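-- pv_equiv track=rewrite | github.com/Ajay-308/nagarro-interview-question | check_same_frequency.py | has_equal_frequency
-- ===== SOURCE A (Python) =====
-- def has_equal_frequency(s):
--     hash_map = {}
--
--     # Step 1: Count frequencies
--     for ch in s:
--         if ch in hash_map:
--             hash_map[ch] += 1
--         else:
--             hash_map[ch] = 1
--
--     # Step 2: Get all frequencies
--     freq_list = list(hash_map.values())
--
--     # Step 3: Check if all frequencies are same
--     for freq in freq_list:
--         if freq != freq_list[0]:
--             return False
--
--     return True
-- ===== SOURCE B (Python) =====
-- def has_equal_frequency(s):
--     # Sort the characters, then collect consecutive runs and their lengths;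
--     # all characters have equal frequency iff all run lengths equal the first.
--     runs = []
--     for c in sorted(s):
--         if runs and c == runs[-1][0]:
--             runs[-1] = (c, runs[-1][1] + 1)
--         else:
--             runs.append((c, 1))
--     lengths = [n for _, n in runs]
--     return all(n == lengths[0] for n in lengths)
-- ===== Notes on version B (the rewrite author's own statement) =====
-- stated objective: alternative
-- what changed: B sorts the characters and scans once collecting consecutive run lengths, then checks all run lengths equal the first, instead of A's hash-map frequency count followed by a comparison pass over the dict values.
import Mathlib
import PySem

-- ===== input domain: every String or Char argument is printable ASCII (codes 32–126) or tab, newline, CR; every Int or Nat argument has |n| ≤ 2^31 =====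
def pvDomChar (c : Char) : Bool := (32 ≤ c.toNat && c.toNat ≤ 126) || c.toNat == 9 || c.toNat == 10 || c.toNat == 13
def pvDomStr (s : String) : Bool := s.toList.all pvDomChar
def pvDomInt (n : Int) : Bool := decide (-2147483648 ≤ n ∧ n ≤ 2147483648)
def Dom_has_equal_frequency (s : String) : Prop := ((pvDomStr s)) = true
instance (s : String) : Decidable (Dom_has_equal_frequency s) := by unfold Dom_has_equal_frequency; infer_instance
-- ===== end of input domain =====

-- B sorts the characters and checks that all consecutive-run lengths are equal,
-- instead of A's frequency dict; same result, alternative algorithm (not claimed faster).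

-- ===== PORT A =====
def has_equal_frequency (s : String) : Bool :=
  -- Step 1: count frequencies into a dict
  let hash_map : PySem.Dict Char Int :=
    s.toList.foldl
      (fun d ch => if d.contains ch then d.insert ch (d.getD ch 0 + 1) else d.insert ch 1)
      PySem.Dict.empty
  -- Step 2: list of frequencies
  let freq_list := hash_map.values
  -- Step 3: every freq equals freq_list[0] (loop body never runs when empty → True)
  match freq_list with
  | [] => true
  | f0 :: _ => freq_list.all (fun f => f == f0)

-- ===== PORT B =====
-- one step of B's scan over the sorted characters: extend the current (last) run or open a new one
-- (the run list is kept reversed here — head = Python's runs[-1] — and reversed back afterwards)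
def hef_step (acc : List (Char × Int)) (c : Char) : List (Char × Int) :=
  match acc with
  | (d, n) :: rest => if c == d then (c, n + 1) :: rest else (c, 1) :: (d, n) :: rest
  | [] => [(c, 1)]

def has_equal_frequency_alt (s : String) : Bool :=
  let runs := (PySem.List.sorted s.toList (fun x => x)).foldl hef_step []
  let lengths := runs.reverse.map (fun p => p.2)
  match lengths with
  | [] => true
  | r0 :: _ => lengths.all (fun n => n == r0)

-- ===== PRECONDITION & SPEC =====
def Spec_has_equal_frequency (s : String) (out : Bool) : Prop := out = has_equal_frequency_alt s
instance (s : String) (out : Bool) : Decidable (Spec_has_equal_frequency s out) := by unfold Spec_has_equal_frequency; infer_instance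

-- ===== CLAIM (what is proved, stated in full; the proofs are below) =====
def Claim_equal_has_equal_frequency : Prop := ∀ (s : String), Dom_has_equal_frequency s → Spec_has_equal_frequency s (has_equal_frequency s)

-- ===== LEMMAS AND PROOFS =====

-- A's dict-building loop is exactly the Counter fold
lemma stepA_eq_counter_step :
    (fun (d : PySem.Dict Char Int) ch =>
      if d.contains ch then d.insert ch (d.getD ch 0 + 1) else d.insert ch 1)
    = (fun (d : PySem.Dict Char Int) x => d.insert x (d.getD x 0 + 1)) := by
  funext d ch
  by_cases h : d.contains ch
  · simp [h]
  · simp [h, PySem.Dict.getD_of_not_contains d 0 (by simpa using h)]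

-- spec of B's scan: the forward run list of a (sorted) char list
def runsSpec : List Char → List (Char × Int)
  | [] => []
  | c :: t => (c, 1 + (t.count c : Int)) :: runsSpec (t.dropWhile (· == c))
  termination_by xs => xs.length
  decreasing_by
    simpa using Nat.lt_succ_of_le (List.length_dropWhile_le _ _)

-- in a sorted list c :: t, everything after the leading run of c is strictly greater
lemma lt_of_mem_dropWhile (c : Char) (t : List Char)
    (h : (c :: t).Pairwise (· ≤ ·)) :
    ∀ x ∈ t.dropWhile (· == c), c < x := by
  intro x hx
  rcases List.pairwise_cons.mp h with ⟨hct, ht⟩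
  rcases hv : t.dropWhile (· == c) with _ | ⟨hd, tl⟩
  · rw [hv] at hx; simp at hx
  · have hne : t.dropWhile (· == c) ≠ [] := by simp [hv]
    have h0 := List.head_dropWhile_not (· == c) hne
    have h1 : (t.dropWhile (· == c)).head hne = hd := by simp [hv]
    rw [h1] at h0
    have hhd : hd ≠ c := by simpa using h0
    have hdt : hd ∈ t := (List.dropWhile_sublist _).subset (by rw [hv]; simp)
    have hchd : c < hd := lt_of_le_of_ne (hct hd hdt) (Ne.symm hhd)
    rw [hv] at hx
    rcases List.mem_cons.mp hx with rfl | hx'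
    · exact hchd
    · have hsub : (hd :: tl).Sublist t := hv ▸ List.dropWhile_sublist (l := t) (· == c)
      exact lt_of_lt_of_le hchd ((List.pairwise_cons.mp (List.Pairwise.sublist hsub ht)).1 x hx')

-- counting in the tail of a sorted list: the leading run carries all the c's …
lemma count_c_eq_takeWhile_length (c : Char) (t : List Char)
    (h : (c :: t).Pairwise (· ≤ ·)) :
    t.count c = (t.takeWhile (· == c)).length := by
  have hv : (t.dropWhile (· == c)).count c = 0 := by
    rw [List.count_eq_zero]
    intro hc
    exact absurd rfl (ne_of_gt (lt_of_mem_dropWhile c t h c hc))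
  have hu : (t.takeWhile (· == c)).count c = (t.takeWhile (· == c)).length :=
    List.count_eq_length.mpr (fun b hb => by
      have hb2 : b = c := by simpa using List.mem_takeWhile_imp hb
      exact hb2.symm)
  calc t.count c = (t.takeWhile (· == c) ++ t.dropWhile (· == c)).count c := by
        rw [List.takeWhile_append_dropWhile]
    _ = _ := by rw [List.count_append, hv, hu, Nat.add_zero]

-- … and any a > c is counted only past it
lemma count_gt_eq_dropWhile_count (c a : Char) (t : List Char) (ha : c < a) :
    t.count a = (t.dropWhile (· == c)).count a := by
  have hu : (t.takeWhile (· == c)).count a = 0 := by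
    rw [List.count_eq_zero]
    intro hc
    have := List.mem_takeWhile_imp hc
    exact absurd (by simpa using this) (ne_of_gt ha)
  calc t.count a = (t.takeWhile (· == c) ++ t.dropWhile (· == c)).count a := by
        rw [List.takeWhile_append_dropWhile]
    _ = _ := by rw [List.count_append, hu, Nat.zero_add]

-- folding hef_step over a run of equal characters just bumps the head count
lemma foldl_hef_step_run (c : Char) :
    ∀ (u : List Char), (∀ x ∈ u, x = c) → ∀ (m : Int) (acc : List (Char × Int)),
    u.foldl hef_step ((c, m) :: acc) = (c, m + u.length) :: acc := by
  intro u
  induction u with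
  | nil => intro _ m acc; simp
  | cons x u' ih =>
    intro hu m acc
    have hx : x = c := hu x (by simp)
    subst hx
    have : hef_step ((x, m) :: acc) x = (x, m + 1) :: acc := by simp [hef_step]
    rw [List.foldl_cons, this, ih (fun y hy => hu y (by simp [hy])) (m + 1) acc]
    congr 2
    simp only [List.length_cons]
    push_cast
    ring

-- characterisation of B's whole scan on a sorted list
lemma foldl_hef_step_eq (n : Nat) :
    ∀ (xs : List Char), xs.length ≤ n → xs.Pairwise (· ≤ ·) →
    ∀ (acc : List (Char × Int)), (∀ p ∈ acc, ∀ x ∈ xs, p.1 < x) →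
    xs.foldl hef_step acc = (runsSpec xs).reverse ++ acc := by
  induction n with
  | zero =>
    intro xs hlen _ acc _
    have : xs = [] := List.eq_nil_of_length_eq_zero (Nat.le_zero.mp hlen)
    subst this; simp [runsSpec]
  | succ n ih =>
    intro xs hlen hsort acc hacc
    match xs with
    | [] => simp [runsSpec]
    | c :: t =>
      have hstep : hef_step acc c = (c, 1) :: acc := by
        match acc with
        | [] => rfl
        | (d, m) :: rest =>
          have hdc : d < c := hacc (d, m) (by simp) c (by simp)
          simp [hef_step, ne_of_gt hdc]
      set u := t.takeWhile (· == c) with hu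
      set v := t.dropWhile (· == c) with hv
      have htuv : u ++ v = t := List.takeWhile_append_dropWhile
      have hcv : ∀ x ∈ v, c < x := lt_of_mem_dropWhile c t hsort
      have hvsort : v.Pairwise (· ≤ ·) :=
        List.Pairwise.sublist (List.dropWhile_sublist _) ((List.pairwise_cons.mp hsort).2)
      have hvlen : v.length ≤ n := by
        have h1 : v.length ≤ t.length := List.length_dropWhile_le _ _
        have h2 : t.length + 1 ≤ n + 1 := by simpa using hlen
        omega
      have hrun : ∀ x ∈ u, x = c := fun x hx => by
        simpa using List.mem_takeWhile_imp hx
      calc (c :: t).foldl hef_step acc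
          = (u ++ v).foldl hef_step ((c, 1) :: acc) := by
            rw [List.foldl_cons, hstep, htuv]
        _ = v.foldl hef_step ((c, 1 + (u.length : Int)) :: acc) := by
            rw [List.foldl_append, foldl_hef_step_run c u hrun 1 acc]
        _ = (runsSpec v).reverse ++ (c, 1 + (u.length : Int)) :: acc := by
            refine ih v hvlen hvsort _ ?_
            intro p hp x hx
            rcases List.mem_cons.mp hp with rfl | hp'
            · exact hcv x hx
            · exact lt_trans (hacc p hp' c (by simp)) (hcv x hx)
        _ = (runsSpec (c :: t)).reverse ++ acc := by
            rw [runsSpec, List.reverse_cons, List.append_assoc, ← hv,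
                count_c_eq_takeWhile_length c t hsort, ← hu]
            simp

-- membership in the run list of a sorted list ↔ (character, its count)
lemma mem_runsSpec (n : Nat) :
    ∀ (xs : List Char), xs.length ≤ n → xs.Pairwise (· ≤ ·) →
    ∀ (p : Char × Int), p ∈ runsSpec xs ↔ p.1 ∈ xs ∧ p.2 = (xs.count p.1 : Int) := by
  induction n with
  | zero =>
    intro xs hlen _ p
    have : xs = [] := List.eq_nil_of_length_eq_zero (Nat.le_zero.mp hlen)
    subst this; simp [runsSpec]
  | succ n ih =>
    intro xs hlen hsort p
    match xs with
    | [] => simp [runsSpec]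
    | c :: t =>
      set v := t.dropWhile (· == c) with hv
      have hcv : ∀ x ∈ v, c < x := lt_of_mem_dropWhile c t hsort
      have hvsort : v.Pairwise (· ≤ ·) :=
        List.Pairwise.sublist (List.dropWhile_sublist _) ((List.pairwise_cons.mp hsort).2)
      have hvlen : v.length ≤ n := by
        have h1 : v.length ≤ t.length := List.length_dropWhile_le _ _
        have h2 : t.length + 1 ≤ n + 1 := by simpa using hlen
        omega
      rw [runsSpec]
      constructor
      · intro hp
        rcases List.mem_cons.mp hp with rfl | hp'
        · refine ⟨by simp, ?_⟩
          show (1 + (t.count c : Int)) = (((c :: t).count c : Nat) : Int)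
          rw [List.count_cons_self]
          push_cast
          ring
        · rcases (ih v hvlen hvsort p).mp hp' with ⟨h1, h2⟩
          have hc1 : c < p.1 := hcv p.1 h1
          refine ⟨List.mem_cons.mpr (Or.inr ((List.dropWhile_sublist _).subset h1)), ?_⟩
          have hcc : (c :: t).count p.1 = v.count p.1 := by
            rw [List.count_cons_of_ne (ne_of_lt hc1), hv]
            exact count_gt_eq_dropWhile_count c p.1 t hc1
          rw [h2, hcc]
      · rintro ⟨h1, h2⟩
        by_cases hpc : p.1 = c
        · have hp2 : p.2 = 1 + (t.count c : Int) := by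
            rw [h2, hpc, List.count_cons_self]
            push_cast
            ring
          exact List.mem_cons.mpr (Or.inl (Prod.ext hpc hp2))
        · have hpt : p.1 ∈ t := by
            rcases List.mem_cons.mp h1 with h' | h'
            · exact absurd h' hpc
            · exact h'
          have hpv : p.1 ∈ v := by
            rw [hv]
            rw [← List.takeWhile_append_dropWhile (p := (· == c)) (l := t)] at hpt
            rcases List.mem_append.mp hpt with h' | h'
            · exact absurd (by simpa using List.mem_takeWhile_imp h') hpc
            · exact h'
          have hc1 : c < p.1 := hcv p.1 hpv
          refine List.mem_cons.mpr (Or.inr ((ih v hvlen hvsort p).mpr ⟨hpv, ?_⟩))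
          have hcc : (c :: t).count p.1 = v.count p.1 := by
            rw [List.count_cons_of_ne (ne_of_lt hc1), hv]
            exact count_gt_eq_dropWhile_count c p.1 t hc1
          rw [h2, hcc]

-- "every element equals the first" is "all elements pairwise equal"
lemma allEq_iff (vs : List Int) :
    (match vs with | [] => true | h :: _ => vs.all (fun f => f == h))
    = decide (∀ a ∈ vs, ∀ b ∈ vs, a = b) := by
  match vs with
  | [] => simp
  | h :: t =>
    rw [Bool.eq_iff_iff]
    simp only [List.all_eq_true, beq_iff_eq, decide_eq_true_eq]
    constructor
    · intro hall a ha b hb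
      rw [hall a ha, hall b hb]
    · intro hall a ha
      exact hall a ha h (by simp)

-- the pairwise-equality test only depends on membership
lemma allEq_congr_mem (vs ws : List Int) (h : ∀ n, n ∈ vs ↔ n ∈ ws) :
    decide (∀ a ∈ vs, ∀ b ∈ vs, a = b) = decide (∀ a ∈ ws, ∀ b ∈ ws, a = b) := by
  rw [decide_eq_decide]
  constructor
  · intro hp a ha b hb
    exact hp a ((h a).mpr ha) b ((h b).mpr hb)
  · intro hp a ha b hb
    exact hp a ((h a).mp ha) b ((h b).mp hb)

-- ===== VERDICT (by name: the statement is the Claim_ definition above) =====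
theorem has_equal_frequency_spec : Claim_equal_has_equal_frequency := by
  intro s _
  unfold Spec_has_equal_frequency has_equal_frequency has_equal_frequency_alt
  simp only []
  set l := s.toList with hl
  set xsS := PySem.List.sorted l (fun x => x) with hxs
  have hsort : xsS.Pairwise (· ≤ ·) := PySem.List.sorted_pairwise l (fun x => x)
  -- A's side: the dict is the Counter, its values are the counts of the distinct chars
  rw [stepA_eq_counter_step, PySem.Dict.foldl_insert_getD_add_one_eq_counter]
  have hvalsA : (PySem.Dict.counter l).values
      = (PySem.Set.ofList l).map (fun k => ((l.count k : Int))) := by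
    show (PySem.Dict.counter l).items.map (·.2) = _
    rw [PySem.Dict.items_counter]
    simp
  -- B's side: the scan is runsSpec of the sorted list
  have hfold : xsS.foldl hef_step [] = (runsSpec xsS).reverse := by
    have := foldl_hef_step_eq xsS.length xsS le_rfl hsort [] (by simp)
    simpa using this
  rw [hvalsA, hfold, List.reverse_reverse]
  rw [allEq_iff, allEq_iff]
  apply allEq_congr_mem
  intro n
  constructor
  · intro hn
    rcases List.mem_map.mp hn with ⟨c, hc, hcn⟩
    have hcl : c ∈ l := (PySem.Set.mem_ofList l c).mp hc
    refine List.mem_map.mpr ⟨(c, n), ?_, rfl⟩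
    refine (mem_runsSpec xsS.length xsS le_rfl hsort (c, n)).mpr ⟨?_, ?_⟩
    · exact (PySem.List.mem_sorted l (fun x => x) false c).mpr hcl
    · rw [← hcn, (PySem.List.sorted_perm l (fun x => x) false).count_eq c]
  · intro hn
    rcases List.mem_map.mp hn with ⟨p, hp, hpn⟩
    rcases (mem_runsSpec xsS.length xsS le_rfl hsort p).mp hp with ⟨h1, h2⟩
    have hcl : p.1 ∈ l := (PySem.List.mem_sorted l (fun x => x) false p.1).mp h1
    refine List.mem_map.mpr ⟨p.1, (PySem.Set.mem_ofList l p.1).mpr hcl, ?_⟩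
    rw [← hpn, h2, (PySem.List.sorted_perm l (fun x => x) false).count_eq p.1]
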